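-- pv_equiv track=rewrite | github.com/felipemaion/studying_python | codefights/stringsRearrangement.py | stringsRearrangement
-- ===== SOURCE A (Python) =====
-- from itertools import permutations
--
-- def stringsRearrangement(inputArray):
--     # Create all possible arrangements:
--     all_permutation = list(permutations(inputArray))
--     # For each arrangement:
--     for current_permutation in all_permutation:
--         i = 0
--         good = True
--         # Check if sequence differs only by one character:
--         while i < len(current_permutation) - 1:
--             if not difference_is_one(current_permutation[i], current_permutation[i + 1]):
--                 good = False
--                 break
--             i += 1
--         if good:
--             return True
--     return False
--
-- def difference_is_one(a,b):
--     words = zip(a, b)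
--     return True if len([letter_a for letter_a, letter_b in words if letter_a != letter_b]) == 1 else False
-- ===== SOURCE B (Python) =====
-- def stringsRearrangement(inputArray):
--     # Pruned backtracking DFS over remaining strings instead of enumerating
--     # all permutations (same truncating one-difference predicate as A).
--     def diff_one(a, b):
--         return sum(x != y for x, y in zip(a, b)) == 1
--
--     def extend(last, remaining):
--         if not remaining:
--             return True
--         return any(diff_one(last, remaining[i])
--                    and extend(remaining[i], remaining[:i] + remaining[i+1:])
--                    for i in range(len(remaining)))
--
--     if not inputArray:
--         return True
--     return any(extend(inputArray[i], inputArray[:i] + inputArray[i+1:])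
--                for i in range(len(inputArray)))
-- ===== Notes on version B (the rewrite author's own statement) =====
-- stated objective: alternative
-- what changed: Replaces enumerate-all-permutations-then-scan with a pruned recursive backtracking search that extends a path only through strings one character away from the last one, using the same truncating one-difference predicate.
import Mathlib
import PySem

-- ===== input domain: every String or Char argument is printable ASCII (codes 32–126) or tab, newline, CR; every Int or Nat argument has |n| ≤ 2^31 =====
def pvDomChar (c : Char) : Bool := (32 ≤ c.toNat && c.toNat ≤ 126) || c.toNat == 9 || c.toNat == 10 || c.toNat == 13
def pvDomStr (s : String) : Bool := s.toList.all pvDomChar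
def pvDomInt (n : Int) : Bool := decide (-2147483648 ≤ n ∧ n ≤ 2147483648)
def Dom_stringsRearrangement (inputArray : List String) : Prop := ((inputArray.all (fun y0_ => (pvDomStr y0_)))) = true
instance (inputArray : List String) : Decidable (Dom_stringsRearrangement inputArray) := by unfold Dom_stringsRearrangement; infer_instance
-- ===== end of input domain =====

-- B replaces A's enumerate-all-permutations-then-scan with a pruned recursive
-- backtracking search (extend a path only through strings one character away).

-- ===== PORT A =====
def difference_is_one (a b : String) : Bool :=
  ((a.toList.zip b.toList).filter (fun p => p.1 != p.2)).length == 1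

-- A's inner while loop (with break) over consecutive pairs
def chainOk : List String → Bool
  | [] => true
  | [_] => true
  | a :: b :: rest => difference_is_one a b && chainOk (b :: rest)

-- shared helper: xs[:i] + xs[i+1:]
def removeAt (xs : List String) (i : Nat) : List String := xs.take i ++ xs.drop (i+1)

-- itertools.permutations: pick each index in order, recurse on the rest
-- (fuel = list length is only a structural-termination guard, unreachable branch)
def pyPermsF : Nat → List String → List (List String)
  | _, [] => [[]]
  | 0, _ :: _ => []
  | fuel+1, x :: t =>
      (List.range (x :: t).length).flatMap
        (fun i => (pyPermsF fuel (removeAt (x :: t) i)).map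
          (fun p => (x :: t).getD i "" :: p))

def stringsRearrangement (inputArray : List String) : Bool :=
  (pyPermsF inputArray.length inputArray).any (fun cur => chainOk cur)

-- ===== PORT B =====
def diff_one (a b : String) : Bool :=
  ((a.toList.zip b.toList).foldl (fun s p => s + (if p.1 != p.2 then 1 else 0)) 0) == 1

-- B's backtracking extension of the current path
-- (fuel = remaining length is only a structural-termination guard, unreachable branch)
def extendF : Nat → String → List String → Bool
  | _, _, [] => true
  | 0, _, _ :: _ => false
  | fuel+1, last, r :: rs =>
      (List.range (r :: rs).length).any
        (fun i => diff_one last ((r :: rs).getD i "") &&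
          extendF fuel ((r :: rs).getD i "") (removeAt (r :: rs) i))

def stringsRearrangement_alt (inputArray : List String) : Bool :=
  if inputArray.isEmpty then true
  else
    (List.range inputArray.length).any
      (fun i => extendF (removeAt inputArray i).length (inputArray.getD i "")
        (removeAt inputArray i))

-- ===== PRECONDITION & SPEC =====
def Spec_stringsRearrangement (inputArray : List String) (out : Bool) : Prop := out = stringsRearrangement_alt inputArray
instance (inputArray : List String) (out : Bool) : Decidable (Spec_stringsRearrangement inputArray out) := by unfold Spec_stringsRearrangement; infer_instance

-- ===== CLAIM (what is proved, stated in full; the proofs are below) =====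
def Claim_equal_stringsRearrangement : Prop := ∀ (inputArray : List String), Dom_stringsRearrangement inputArray → Spec_stringsRearrangement inputArray (stringsRearrangement inputArray)

-- ===== LEMMAS AND PROOFS =====

theorem removeAt_length (xs : List String) (i : Nat) (h : i < xs.length) :
    (removeAt xs i).length = xs.length - 1 := by
  simp [removeAt]; omega

theorem count_foldl (l : List (Char × Char)) (n : Nat) :
    l.foldl (fun s p => s + (if p.1 != p.2 then 1 else 0)) n
      = n + (l.filter (fun p => p.1 != p.2)).length := by
  induction l generalizing n with
  | nil => simp
  | cons h t ih =>
    rw [List.foldl_cons, List.filter_cons, ih]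
    split_ifs <;> simp <;> omega

theorem diff_eq (a b : String) : diff_one a b = difference_is_one a b := by
  simp only [diff_one, difference_is_one, count_foldl, Nat.zero_add]

theorem any_congr_mem {α : Type} (l : List α) (f g : α → Bool)
    (h : ∀ a ∈ l, f a = g a) : l.any f = l.any g := by
  induction l with
  | nil => rfl
  | cons x t ih =>
    simp only [List.any_cons, h x (by simp),
      ih (fun a ha => h a (List.mem_cons_of_mem _ ha))]

theorem any_and_left {α : Type} (l : List α) (c : Bool) (f : α → Bool) :
    (l.any fun x => c && f x) = (c && l.any f) := by
  cases c <;> simp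

theorem extend_eq : ∀ (fuel : Nat) (rem : List String), rem.length ≤ fuel →
    ∀ last, extendF fuel last rem
      = (pyPermsF fuel rem).any (fun p => chainOk (last :: p)) := by
  intro fuel
  induction fuel with
  | zero =>
    intro rem h last
    have : rem = [] := List.length_eq_zero_iff.mp (Nat.le_zero.mp h)
    subst this; simp [extendF, pyPermsF, chainOk]
  | succ n ih =>
    intro rem h last
    match rem with
    | [] => simp [extendF, pyPermsF, chainOk]
    | r :: rs =>
      have hlen : rs.length ≤ n := Nat.le_of_succ_le_succ (by simpa using h)
      rw [extendF, pyPermsF, List.any_flatMap]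
      apply any_congr_mem
      intro i hi
      have hi' : i < (r :: rs).length := List.mem_range.mp hi
      have hrl : (removeAt (r :: rs) i).length ≤ n := by
        rw [removeAt_length _ _ hi']; simpa using hlen
      rw [List.any_map, ih _ hrl]
      rw [show ((fun p => chainOk (last :: p)) ∘ (fun p => (r :: rs).getD i "" :: p))
            = fun p => difference_is_one last ((r :: rs).getD i "") &&
                chainOk ((r :: rs).getD i "" :: p) from funext (fun p => rfl)]
      rw [any_and_left, diff_eq]

theorem ab_eq (xs : List String) :
    stringsRearrangement xs = stringsRearrangement_alt xs := by
  match xs with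
  | [] => simp [stringsRearrangement, stringsRearrangement_alt, pyPermsF, chainOk]
  | x :: t =>
    unfold stringsRearrangement stringsRearrangement_alt
    rw [show (x :: t).length = t.length + 1 from rfl, pyPermsF, List.any_flatMap,
      if_neg (by simp)]
    apply any_congr_mem
    intro i hi
    have hi' : i < (x :: t).length := List.mem_range.mp hi
    have hrl : (removeAt (x :: t) i).length = t.length := by
      rw [removeAt_length _ _ hi']; simp
    rw [List.any_map, hrl, extend_eq t.length _ (le_of_eq hrl)]
    apply any_congr_mem
    intro p _
    rfl

-- ===== VERDICT (by name: the statement is the Claim_ definition above) =====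
theorem stringsRearrangement_spec : Claim_equal_stringsRearrangement := by
  intro inputArray _
  unfold Spec_stringsRearrangement
  exact ab_eq inputArray
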